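-- pv_equiv track=rewrite | github.com/SuperiorHaxs/SignBridge | dataset-utilities/concatenation/overlay_captions.py | build_sentence_map
-- ===== SOURCE A (Python) =====
-- def build_sentence_map(segments, sentences):
--     """Map each segment to its sentence based on sentence breaks."""
--     seg_to_sentence = {}
--     sentence_idx = 0
--
--     for i, seg in enumerate(segments):
--         if sentence_idx < len(sentences):
--             seg_to_sentence[i] = sentence_idx
--
--         if seg.get('sentence_break_after', False):
--             sentence_idx += 1
--
--     return seg_to_sentence
-- ===== SOURCE B (Python) =====
-- def build_sentence_map(segments, sentences):
--     """Map each segment to its sentence based on sentence breaks."""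
--     # Pass 1: prefix array - idx[i] = number of sentence breaks strictly before segment i.
--     idx = [0]
--     for seg in segments:
--         idx.append(idx[-1] + bool(seg.get('sentence_break_after', False)))
--     n = len(sentences)
--     # Pass 2: filtered dict comprehension over the precomputed indices.
--     return {i: s for i, s in enumerate(idx[:-1]) if s < n}
-- ===== Notes on version B (the rewrite author's own statement) =====
-- stated objective: alternative
-- what changed: Replaces the single stateful loop (in-loop counter with conditional dict writes) by two passes: a prefix-sum array of break flags, then a filtered dict comprehension over enumerate(prefixes).
import Mathlib
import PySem

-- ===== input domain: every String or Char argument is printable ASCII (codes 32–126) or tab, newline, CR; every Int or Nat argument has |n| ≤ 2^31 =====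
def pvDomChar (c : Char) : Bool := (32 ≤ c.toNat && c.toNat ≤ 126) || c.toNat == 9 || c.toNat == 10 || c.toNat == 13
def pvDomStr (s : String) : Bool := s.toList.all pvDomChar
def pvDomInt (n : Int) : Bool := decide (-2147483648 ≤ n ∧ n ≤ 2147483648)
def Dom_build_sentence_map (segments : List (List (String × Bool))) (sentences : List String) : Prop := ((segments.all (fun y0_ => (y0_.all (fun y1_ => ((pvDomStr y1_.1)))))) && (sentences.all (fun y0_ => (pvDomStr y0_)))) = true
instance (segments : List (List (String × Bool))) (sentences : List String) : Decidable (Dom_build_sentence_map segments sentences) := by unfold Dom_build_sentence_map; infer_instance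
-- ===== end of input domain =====

-- B replaces A's single stateful loop by a prefix-sum pass over the break flags followed by a
-- filtered dict comprehension; same O(n) cost, different decomposition; return values proved equal.


-- shared helper: seg.get('sentence_break_after', False) on the assoc-list dict (first match)
def pvGetBreak (seg : List (String × Bool)) : Bool :=
  ((seg.find? (fun p => p.1 == "sentence_break_after")).map (·.2)).getD false

-- ===== PORT A =====
-- loop body of A: conditional dict write, then counter update
def pvStepA (L : Int) (st : PySem.Dict Int Int × Int) (p : Int × List (String × Bool)) :
    PySem.Dict Int Int × Int :=
  (if st.2 < L then st.1.insert p.1 st.2 else st.1,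
   if pvGetBreak p.2 then st.2 + 1 else st.2)

def build_sentence_map (segments : List (List (String × Bool))) (sentences : List String) : List (Int × Int) :=
  ((PySem.List.enumerate segments 0).foldl (pvStepA (sentences.length : Int))
    (PySem.Dict.empty, 0)).1.items

-- ===== PORT B =====
-- pass 1 loop body: idx.append(idx[-1] + bool(...))
def pvStepIdx (acc : List Int) (seg : List (String × Bool)) : List Int :=
  acc ++ [acc.getLastD 0 + (if pvGetBreak seg then 1 else 0)]

-- pass 2 body: the filtered dict comprehension
def pvStepB (L : Int) (d : PySem.Dict Int Int) (p : Int × Int) : PySem.Dict Int Int :=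
  if p.2 < L then d.insert p.1 p.2 else d

def build_sentence_map_alt (segments : List (List (String × Bool))) (sentences : List String) : List (Int × Int) :=
  ((PySem.List.enumerate (segments.foldl pvStepIdx [0]).dropLast 0).foldl
    (pvStepB (sentences.length : Int)) PySem.Dict.empty).items

-- ===== PRECONDITION & SPEC =====
def Spec_build_sentence_map (segments : List (List (String × Bool))) (sentences : List String) (out : List (Int × Int)) : Prop := out = build_sentence_map_alt segments sentences
instance (segments : List (List (String × Bool))) (sentences : List String) (out : List (Int × Int)) : Decidable (Spec_build_sentence_map segments sentences out) := by unfold Spec_build_sentence_map; infer_instance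

-- ===== CLAIM (what is proved, stated in full; the proofs are below) =====
def Claim_equal_build_sentence_map : Prop := ∀ (segments : List (List (String × Bool))) (sentences : List String), Dom_build_sentence_map segments sentences → Spec_build_sentence_map segments sentences (build_sentence_map segments sentences)

-- ===== LEMMAS AND PROOFS =====

-- the common value both programs compute: pairs (n+j, c + breaks-before-j) while the count is < L
def pvF (L : Int) : List (List (String × Bool)) → Int → Int → List (Int × Int)
  | [], _, _ => []
  | s :: t, n, c =>
      (if c < L then [(n, c)] else []) ++ pvF L t (n + 1) (c + (if pvGetBreak s then 1 else 0))

-- the tail of B's prefix array starting from running count c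
def pvQ : List (List (String × Bool)) → Int → List Int
  | [], _ => []
  | s :: t, c => (c + (if pvGetBreak s then 1 else 0)) :: pvQ t (c + (if pvGetBreak s then 1 else 0))

-- the value of B's comprehension fold on a plain value list
def pvG (L : Int) : List Int → Int → List (Int × Int)
  | [], _ => []
  | v :: t, n => (if v < L then [(n, v)] else []) ++ pvG L t (n + 1)

theorem pvA_fold (L : Int) : ∀ (l : List (List (String × Bool))) (d : PySem.Dict Int Int) (c n : Int),
    (∀ k ∈ d.keys, k < n) →
    (((PySem.List.enumerate l n).foldl (pvStepA L) (d, c)).1).items = d.items ++ pvF L l n c := by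
  intro l
  induction l with
  | nil => intro d c n _; simp [PySem.List.enumerate, pvF]
  | cons s t ih =>
    intro d c n hk
    rw [PySem.List.enumerate_cons]
    simp only [List.foldl_cons, pvF]
    have hfresh : d.contains n = false := by
      rw [PySem.Dict.contains_eq_decide_mem_keys]
      simp only [decide_eq_false_iff_not]
      intro hn; exact absurd (hk n hn) (lt_irrefl n)
    have hk' : ∀ k ∈ (if c < L then d.insert n c else d).keys, k < n + 1 := by
      intro k hkk
      by_cases hc : c < L
      · simp only [if_pos hc, PySem.Dict.mem_keys_insert] at hkk
        rcases hkk with h | h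
        · omega
        · have := hk k h; omega
      · simp only [if_neg hc] at hkk; have := hk k hkk; omega
    rw [show pvStepA L (d, c) (n, s) =
        (if c < L then d.insert n c else d, if pvGetBreak s then c + 1 else c) from rfl]
    rw [ih _ _ _ hk']
    by_cases hc : c < L
    · rw [if_pos hc, if_pos hc, PySem.Dict.items_insert_of_not_contains _ _ hfresh]
      by_cases hb : pvGetBreak s <;> simp [hb, List.append_assoc]
    · rw [if_neg hc, if_neg hc]
      by_cases hb : pvGetBreak s <;> simp [hb]

theorem pvIdx_fold : ∀ (l : List (List (String × Bool))) (acc : List Int) (c : Int),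
    acc.getLastD 0 = c → l.foldl pvStepIdx acc = acc ++ pvQ l c := by
  intro l
  induction l with
  | nil => intro acc c _; simp [pvQ]
  | cons s t ih =>
    intro acc c hc
    simp only [List.foldl_cons, pvQ]
    have h1 : pvStepIdx acc s = acc ++ [c + (if pvGetBreak s then 1 else 0)] := by
      simp only [pvStepIdx, hc]
    rw [h1, ih _ (c + (if pvGetBreak s then 1 else 0)) (by simp)]
    simp

theorem pvB_fold (L : Int) : ∀ (vs : List Int) (d : PySem.Dict Int Int) (n : Int),
    (∀ k ∈ d.keys, k < n) →
    ((PySem.List.enumerate vs n).foldl (pvStepB L) d).items = d.items ++ pvG L vs n := by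
  intro vs
  induction vs with
  | nil => intro d n _; simp [PySem.List.enumerate, pvG]
  | cons v t ih =>
    intro d n hk
    rw [PySem.List.enumerate_cons]
    simp only [List.foldl_cons, pvG]
    have hfresh : d.contains n = false := by
      rw [PySem.Dict.contains_eq_decide_mem_keys]
      simp only [decide_eq_false_iff_not]
      intro hn; exact absurd (hk n hn) (lt_irrefl n)
    have hk' : ∀ k ∈ (pvStepB L d (n, v)).keys, k < n + 1 := by
      intro k hkk
      simp only [pvStepB] at hkk
      by_cases hc : v < L
      · simp only [if_pos hc, PySem.Dict.mem_keys_insert] at hkk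
        rcases hkk with h | h
        · omega
        · have := hk k h; omega
      · simp only [if_neg hc] at hkk; have := hk k hkk; omega
    rw [ih _ _ hk']
    by_cases hc : v < L
    · rw [show pvStepB L d (n, v) = d.insert n v from by simp [pvStepB, hc]]
      rw [PySem.Dict.items_insert_of_not_contains _ _ hfresh]
      simp [hc, List.append_assoc]
    · rw [show pvStepB L d (n, v) = d from by simp [pvStepB, hc]]
      simp [hc]

theorem pvG_dropLast (L : Int) : ∀ (l : List (List (String × Bool))) (c n : Int),
    pvG L ((c :: pvQ l c).dropLast) n = pvF L l n c := by
  intro l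
  induction l with
  | nil => intro c n; simp [pvQ, pvG, pvF]
  | cons s t ih =>
    intro c n
    simp only [pvQ, pvF]
    rw [List.dropLast_cons_of_ne_nil (by simp : ((c + (if pvGetBreak s then 1 else 0)) :: pvQ t (c + (if pvGetBreak s then 1 else 0))) ≠ [])]
    simp only [pvG]
    rw [ih]

-- ===== VERDICT (by name: the statement is the Claim_ definition above) =====
theorem build_sentence_map_spec : Claim_equal_build_sentence_map := by
  intro segments sentences _
  unfold Spec_build_sentence_map build_sentence_map build_sentence_map_alt
  rw [pvA_fold (sentences.length : Int) segments PySem.Dict.empty 0 0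
    (by simp [PySem.Dict.keys_empty])]
  rw [pvIdx_fold segments [0] 0 (by simp)]
  rw [show ([0] ++ pvQ segments 0 : List Int) = (0 : Int) :: pvQ segments 0 from by simp]
  rw [pvB_fold (sentences.length : Int) _ PySem.Dict.empty 0 (by simp [PySem.Dict.keys_empty])]
  rw [pvG_dropLast]
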